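-- pv_equiv track=rewrite | github.com/small-java-world/DiffGR | diffgr/review_state.py | _selection_tokens_from_rows
-- ===== SOURCE A (Python) =====
-- from typing import Any
--
-- STATE_DIFF_SECTIONS = ("reviews", "groupBriefs", "analysisState", "threadState")
--
-- def _selection_tokens_from_rows(rows: list[dict[str, Any]]) -> list[str]:
--     section_order = {name: index for index, name in enumerate(STATE_DIFF_SECTIONS, start=1)}
--     sorted_rows = sorted(
--         rows,
--         key=lambda row: (
--             section_order.get(str(row.get("section", "")), 99),
--             str(row.get("selectionToken", "")),
--             str(row.get("changeKind", "")),
--             str(row.get("key", "")),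
--         ),
--     )
--     seen: set[str] = set()
--     tokens: list[str] = []
--     for row in sorted_rows:
--         token = str(row.get("selectionToken", "")).strip()
--         if not token or token in seen:
--             continue
--         seen.add(token)
--         tokens.append(token)
--     return tokens
-- ===== SOURCE B (Python) =====
-- def _selection_tokens_from_rows(rows):
--     # Single pass: for each nonempty stripped token keep the minimal composite
--     # sort key seen; then sort only the distinct tokens by their stored key.
--     section_order = {"reviews": 1, "groupBriefs": 2, "analysisState": 3, "threadState": 4}
--     best = {}
--     for row in rows:
--         token = str(row.get("selectionToken", "")).strip()
--         if not token:
--             continue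
--         key = (
--             section_order.get(str(row.get("section", "")), 99),
--             str(row.get("selectionToken", "")),
--             str(row.get("changeKind", "")),
--             str(row.get("key", "")),
--         )
--         if token not in best or key < best[token]:
--             best[token] = key
--     return sorted(best, key=best.__getitem__)
-- ===== Notes on version B (the rewrite author's own statement) =====
-- stated objective: alternative
-- what changed: Instead of sorting all rows and scanning the sorted list with a seen-set, B makes one unsorted pass keeping for each nonempty stripped token the minimal composite sort key in a dict, then sorts only the distinct tokens by their stored minimal key.
import Mathlib
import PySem

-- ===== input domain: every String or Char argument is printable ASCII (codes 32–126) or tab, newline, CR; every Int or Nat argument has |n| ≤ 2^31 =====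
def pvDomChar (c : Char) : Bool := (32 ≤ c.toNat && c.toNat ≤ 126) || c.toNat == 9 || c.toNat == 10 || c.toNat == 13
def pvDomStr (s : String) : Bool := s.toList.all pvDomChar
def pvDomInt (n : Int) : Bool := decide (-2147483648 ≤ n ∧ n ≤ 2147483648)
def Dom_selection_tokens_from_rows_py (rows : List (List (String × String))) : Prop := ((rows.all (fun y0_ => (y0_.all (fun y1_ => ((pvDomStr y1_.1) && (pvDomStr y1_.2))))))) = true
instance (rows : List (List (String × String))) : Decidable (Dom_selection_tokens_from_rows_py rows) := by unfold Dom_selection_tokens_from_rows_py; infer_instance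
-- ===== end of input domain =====

-- B groups rows by stripped token keeping the minimal composite key per token, then
-- sorts only the distinct tokens — a different decomposition than A's sort-all-then-dedup.

-- ===== PORT A =====
-- section_order = {name: index for index, name in enumerate(STATE_DIFF_SECTIONS, start=1)}
def pvSectionOrder : PySem.Dict String Int :=
  (PySem.List.enumerate ["reviews", "groupBriefs", "analysisState", "threadState"] 1).foldl
    (fun d p => d.insert p.2 p.1) PySem.Dict.empty

-- the 4-tuple sort key of one row (row.get(k, "") on the row-as-dict; str(·) is the identity on str values)
def pvKeyT (row : List (String × String)) : Int × String × String × String :=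
  (pvSectionOrder.getD ((PySem.Dict.mk row).getD "section" "") 99,
   (PySem.Dict.mk row).getD "selectionToken" "",
   (PySem.Dict.mk row).getD "changeKind" "", (PySem.Dict.mk row).getD "key" "")

-- Python's `<` on (int, str, str, str) tuples, component-lexicographic: exact hand port
def pvTupLt (v w : Int × String × String × String) : Bool :=
  decide (v.1 < w.1) || (decide (v.1 = w.1) &&
    (decide (v.2.1 < w.2.1) || (decide (v.2.1 = w.2.1) &&
      (decide (v.2.2.1 < w.2.2.1) || (decide (v.2.2.1 = w.2.2.1) &&
        decide (v.2.2.2 < w.2.2.2))))))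

-- str(row.get("selectionToken", "")).strip()
def pvTok (row : List (String × String)) : String :=
  PySem.Str.strip ((PySem.Dict.mk row).getD "selectionToken" "")

def selection_tokens_from_rows_py (rows : List (List (String × String))) : List String :=
  -- sorted(rows, key=…): Python's stable insertion sort with the tuple key, as in
  -- PySem.List.sorted_eq_foldl_insertBy
  let sortedRows := rows.foldl
    (fun acc x => PySem.List.insertBy (fun a b => pvTupLt (pvKeyT a) (pvKeyT b)) x acc) []
  (sortedRows.foldl
    (fun (st : PySem.Set String × List String) row =>
      let token := pvTok row
      if token = "" ∨ st.1.contains token = true then st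
      else (st.1.add token, st.2 ++ [token]))
    (PySem.Set.empty, [])).2

-- ===== PORT B =====
def selection_tokens_from_rows_py_alt (rows : List (List (String × String))) : List String :=
  let best := rows.foldl
    (fun (best : PySem.Dict String (Int × String × String × String)) row =>
      let token := pvTok row
      -- `token not in best or key < best[token]` (short-circuit: the getD default is never used)
      if token = "" then best
      else if !(best.contains token) || pvTupLt (pvKeyT row) (best.getD token (pvKeyT row)) then
        best.insert token (pvKeyT row)
      else best)
    PySem.Dict.empty
  -- sorted(best, key=best.__getitem__): keys ordered by stored tuple value
  (best.items.foldl
    (fun acc kv => PySem.List.insertBy (fun a b => pvTupLt a.2 b.2) kv acc) []).map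
      (fun kv => kv.1)

-- ===== PRECONDITION & SPEC =====
def Spec_selection_tokens_from_rows_py (rows : List (List (String × String))) (out : List String) : Prop := out = selection_tokens_from_rows_py_alt rows
instance (rows : List (List (String × String))) (out : List String) : Decidable (Spec_selection_tokens_from_rows_py rows out) := by unfold Spec_selection_tokens_from_rows_py; infer_instance

-- ===== CLAIM (what is proved, stated in full; the proofs are below) =====
def Claim_equal_selection_tokens_from_rows_py : Prop := ∀ (rows : List (List (String × String))), Dom_selection_tokens_from_rows_py rows → Spec_selection_tokens_from_rows_py rows (selection_tokens_from_rows_py rows)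

-- ===== LEMMAS AND PROOFS =====

-- proof-side view of the tuple key: Python tuple `<` is the lexicographic order Lex
abbrev PvKey : Type := Lex (Int × Lex (String × Lex (String × String)))

def lexOfV (v : Int × String × String × String) : PvKey :=
  toLex (v.1, toLex (v.2.1, toLex (v.2.2.1, v.2.2.2)))

def vOfLex (k : PvKey) : Int × String × String × String :=
  ((ofLex k).1, (ofLex (ofLex k).2).1,
   (ofLex (ofLex (ofLex k).2).2).1, (ofLex (ofLex (ofLex k).2).2).2)

def pvRowKey (row : List (String × String)) : PvKey := lexOfV (pvKeyT row)

theorem pvTupLt_eq (v w : Int × String × String × String) :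
    pvTupLt v w = decide (lexOfV v < lexOfV w) := by
  rcases v with ⟨a1, b1, c1, d1⟩
  rcases w with ⟨a2, b2, c2, d2⟩
  have hiff : (lexOfV (a1, b1, c1, d1) < lexOfV (a2, b2, c2, d2)) ↔
      (a1 < a2 ∨ a1 = a2 ∧ (b1 < b2 ∨ b1 = b2 ∧ (c1 < c2 ∨ c1 = c2 ∧ d1 < d2))) := by
    rw [lexOfV, lexOfV]
    rw [Prod.Lex.toLex_lt_toLex]
    simp only [Prod.Lex.toLex_lt_toLex]
  rw [Bool.eq_iff_iff]
  simp only [pvTupLt, Bool.or_eq_true, Bool.and_eq_true, decide_eq_true_eq]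
  rw [hiff]

theorem pvSortRows_eq (rows : List (List (String × String))) :
    rows.foldl
      (fun acc x => PySem.List.insertBy (fun a b => pvTupLt (pvKeyT a) (pvKeyT b)) x acc) [] =
      PySem.List.sorted rows pvRowKey := by
  rw [PySem.List.sorted_eq_foldl_insertBy]
  congr 1
  funext acc x
  congr 1
  funext a b
  rw [pvTupLt_eq]
  rfl

theorem pvSortItems_eq (l : List (String × (Int × String × String × String))) :
    l.foldl (fun acc kv => PySem.List.insertBy (fun a b => pvTupLt a.2 b.2) kv acc) [] =
      PySem.List.sorted l (fun kv => lexOfV kv.2) := by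
  rw [PySem.List.sorted_eq_foldl_insertBy]
  congr 1
  funext acc x
  congr 1
  funext a b
  rw [pvTupLt_eq]

-- named loop bodies (definitionally the lambdas of the two ports)
def pvStepA (st : PySem.Set String × List String) (row : List (String × String)) :
    PySem.Set String × List String :=
  let token := pvTok row
  if token = "" ∨ st.1.contains token = true then st
  else (st.1.add token, st.2 ++ [token])

def pvStepB (best : PySem.Dict String (Int × String × String × String))
    (row : List (String × String)) : PySem.Dict String (Int × String × String × String) :=
  let token := pvTok row
  if token = "" then best
  else if !(best.contains token) || pvTupLt (pvKeyT row) (best.getD token (pvKeyT row)) then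
    best.insert token (pvKeyT row)
  else best

theorem pvA_eq (rows : List (List (String × String))) :
    selection_tokens_from_rows_py rows =
      ((PySem.List.sorted rows pvRowKey).foldl pvStepA (PySem.Set.empty, [])).2 := by
  show ((rows.foldl
    (fun acc x => PySem.List.insertBy (fun a b => pvTupLt (pvKeyT a) (pvKeyT b)) x acc)
      []).foldl pvStepA (PySem.Set.empty, [])).2 = _
  rw [pvSortRows_eq]

theorem pvB_eq (rows : List (List (String × String))) :
    selection_tokens_from_rows_py_alt rows =
      (PySem.List.sorted (rows.foldl pvStepB PySem.Dict.empty).items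
        (fun kv => lexOfV kv.2)).map (fun kv => kv.1) := by
  show ((rows.foldl pvStepB PySem.Dict.empty).items.foldl
    (fun acc kv => PySem.List.insertBy (fun a b => pvTupLt a.2 b.2) kv acc) []).map
      (fun kv => kv.1) = _
  rw [pvSortItems_eq]

-- first-seen dedup of a token list, also skipping empty tokens, relative to a seen set
def pvDD (seen : List String) : List String → List String
  | [] => []
  | t :: ts => if t = "" ∨ t ∈ seen then pvDD seen ts else t :: pvDD (seen ++ [t]) ts

theorem pvDD_nil (seen : List String) : pvDD seen [] = [] := rfl

theorem pvDD_cons (seen : List String) (t : String) (ts : List String) :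
    pvDD seen (t :: ts) =
      if t = "" ∨ t ∈ seen then pvDD seen ts else t :: pvDD (seen ++ [t]) ts := rfl

-- A's loop is pvDD
theorem pvFoldA (L : List (List (String × String))) :
    ∀ (s : PySem.Set String) (acc : List String),
      (L.foldl pvStepA (s, acc)).2 = acc ++ pvDD s (L.map pvTok) := by
  induction L with
  | nil => intro s acc; simp [pvDD_nil]
  | cons r L ih =>
    intro s acc
    simp only [List.foldl_cons, List.map_cons, pvDD_cons]
    by_cases h : pvTok r = "" ∨ pvTok r ∈ s
    · have hc : pvTok r = "" ∨ s.contains (pvTok r) = true := by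
        rcases h with h | h
        · exact Or.inl h
        · exact Or.inr ((PySem.Set.contains_iff s (pvTok r)).2 h)
      simp only [pvStepA, if_pos hc, if_pos h, ih]
    · push_neg at h
      have hc : ¬ (pvTok r = "" ∨ s.contains (pvTok r) = true) := by
        rintro (h1 | h1)
        · exact h.1 h1
        · exact h.2 ((PySem.Set.contains_iff s (pvTok r)).1 h1)
      have hadd : PySem.Set.add s (pvTok r) = s ++ [pvTok r] := by
        simp only [PySem.Set.add]
        rw [if_neg]
        intro hc1
        exact h.2 ((PySem.Set.contains_iff s (pvTok r)).1 hc1)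
      rw [if_neg (by tauto : ¬ (pvTok r = "" ∨ pvTok r ∈ s))]
      have hstep : pvStepA (s, acc) r = (s ++ [pvTok r], acc ++ [pvTok r]) := by
        simp only [pvStepA, if_neg hc, hadd]
      rw [hstep, ih]
      simp

-- membership in pvDD
theorem pvDD_mem (l : List String) :
    ∀ (seen : List String) (t : String),
      t ∈ pvDD seen l ↔ t ∉ seen ∧ t ≠ "" ∧ t ∈ l := by
  induction l with
  | nil => intro seen t; simp [pvDD_nil]
  | cons x xs ih =>
    intro seen t
    rw [pvDD_cons]
    by_cases h : x = "" ∨ x ∈ seen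
    · rw [if_pos h, ih]
      constructor
      · rintro ⟨h1, h2, h3⟩; exact ⟨h1, h2, List.mem_cons_of_mem _ h3⟩
      · rintro ⟨h1, h2, h3⟩
        rcases List.mem_cons.1 h3 with rfl | h3
        · rcases h with h | h
          · exact absurd h h2
          · exact absurd h h1
        · exact ⟨h1, h2, h3⟩
    · push_neg at h
      rw [if_neg (by tauto)]
      constructor
      · intro ht
        rcases List.mem_cons.1 ht with rfl | ht
        · exact ⟨h.2, h.1, List.mem_cons_self⟩
        · have hm := (ih _ _).1 ht
          refine ⟨fun hs => hm.1 (by simp [hs]), hm.2.1, List.mem_cons_of_mem _ hm.2.2⟩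
      · rintro ⟨h1, h2, h3⟩
        rcases List.mem_cons.1 h3 with rfl | h3
        · exact List.mem_cons_self
        · by_cases hx : t = x
          · subst hx; exact List.mem_cons_self
          · exact List.mem_cons_of_mem _ ((ih _ _).2 ⟨by simp [h1, hx], h2, h3⟩)

theorem pvDD_nodup (l : List String) : ∀ seen : List String, (pvDD seen l).Nodup := by
  induction l with
  | nil => intro seen; simp [pvDD_nil]
  | cons x xs ih =>
    intro seen
    rw [pvDD_cons]
    split_ifs with h
    · exact ih seen
    · refine List.nodup_cons.2 ⟨fun hx => ?_, ih _⟩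
      exact ((pvDD_mem _ _ _).1 hx).1 (by simp)

-- pvDD over an appended element
theorem pvDD_append_singleton (l : List String) :
    ∀ (seen : List String) (t : String),
      pvDD seen (l ++ [t]) =
        pvDD seen l ++ (if t = "" ∨ t ∈ seen ∨ t ∈ l then [] else [t]) := by
  induction l with
  | nil => intro seen t; simp [pvDD]
  | cons x xs ih =>
    intro seen t
    rw [List.cons_append, pvDD_cons, pvDD_cons]
    by_cases h : x = "" ∨ x ∈ seen
    · rw [if_pos h, if_pos h, ih]
      congr 1
      by_cases hc : t = "" ∨ t ∈ seen ∨ t ∈ xs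
      · rw [if_pos hc, if_pos]
        rcases hc with hc | hc | hc
        · exact Or.inl hc
        · exact Or.inr (Or.inl hc)
        · exact Or.inr (Or.inr (List.mem_cons_of_mem _ hc))
      · rw [if_neg hc]
        push_neg at hc
        rw [if_neg]
        rintro (h1 | h1 | h1)
        · exact hc.1 h1
        · exact hc.2.1 h1
        · rcases List.mem_cons.1 h1 with rfl | h1
          · rcases h with h | h
            · exact hc.1 h
            · exact hc.2.1 h
          · exact hc.2.2 h1
    · rw [if_neg h, if_neg h, ih, List.cons_append]
      congr 2
      push_neg at h
      by_cases hc : t = "" ∨ t ∈ seen ++ [x] ∨ t ∈ xs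
      · rw [if_pos hc, if_pos]
        rcases hc with hc | hc | hc
        · exact Or.inl hc
        · rcases List.mem_append.1 hc with hc | hc
          · exact Or.inr (Or.inl hc)
          · have hx : t = x := by simpa using hc
            exact Or.inr (Or.inr (hx ▸ List.mem_cons_self))
        · exact Or.inr (Or.inr (List.mem_cons_of_mem _ hc))
      · rw [if_neg hc]
        push_neg at hc
        rw [if_neg]
        rintro (h1 | h1 | h1)
        · exact hc.1 h1
        · exact hc.2.1 (by simp [h1])
        · rcases List.mem_cons.1 h1 with rfl | h1
          · exact hc.2.1 (by simp)
          · exact hc.2.2 h1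

-- the first row of L whose stripped token is t
def pvFirst (L : List (List (String × String))) (t : String) :
    Option (List (String × String)) :=
  (L.filter (fun r => pvTok r == t)).head?

-- equal keys force equal tokens (the key carries the unstripped token)
theorem pvRowKey_inj_tok {r s : List (String × String)} (h : pvRowKey r = pvRowKey s) :
    pvTok r = pvTok s := by
  have h2 : (PySem.Dict.mk r).getD "selectionToken" "" = (PySem.Dict.mk s).getD "selectionToken" "" := by
    have h3 := congrArg (fun k => (ofLex ((ofLex k).2)).1) h
    simpa [pvRowKey] using h3
  simp [pvTok, h2]

theorem pvFirst_cons_ne {r : List (String × String)} {L : List (List (String × String))}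
    {t : String} (h : pvTok r ≠ t) : pvFirst (r :: L) t = pvFirst L t := by
  simp [pvFirst, List.filter_cons, h]

theorem pvFirst_cons_eq {r : List (String × String)} {L : List (List (String × String))}
    {t : String} (h : pvTok r = t) : pvFirst (r :: L) t = some r := by
  simp [pvFirst, List.filter_cons, h]

theorem pvFirst_some {L : List (List (String × String))} {t : String}
    {r : List (String × String)} (h : pvFirst L t = some r) : r ∈ L ∧ pvTok r = t := by
  have h' : (L.filter (fun r => pvTok r == t)).head? = some r := h
  have hm : r ∈ L.filter (fun r => pvTok r == t) :=
    List.mem_of_mem_head? (Option.mem_def.2 h')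
  have := List.mem_filter.1 hm
  exact ⟨this.1, by simpa using this.2⟩

theorem pvFirst_exists {L : List (List (String × String))} {t : String}
    (h : ∃ r ∈ L, pvTok r = t) : ∃ r, pvFirst L t = some r := by
  rcases h with ⟨r, hr, ht⟩
  have hm : r ∈ L.filter (fun r => pvTok r == t) := List.mem_filter.2 ⟨hr, by simp [ht]⟩
  cases hf : L.filter (fun r => pvTok r == t) with
  | nil => rw [hf] at hm; simp at hm
  | cons a as => exact ⟨a, by simp [pvFirst, hf]⟩

-- the core ordering fact: on a key-sorted row list, pvDD lists tokens in strictly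
-- increasing order of the key of their first (= minimal) representative
theorem pvDD_pairwise (L : List (List (String × String)))
    (hL : L.Pairwise (fun a b => pvRowKey a ≤ pvRowKey b)) :
    ∀ seen : List String,
      (pvDD seen (L.map pvTok)).Pairwise (fun a b =>
        ∃ ra rb, pvFirst L a = some ra ∧ pvFirst L b = some rb ∧ pvRowKey ra < pvRowKey rb) := by
  induction L with
  | nil => intro seen; simp [pvDD_nil]
  | cons r L ih =>
    rcases List.pairwise_cons.1 hL with ⟨hr, hL'⟩
    intro seen
    rw [List.map_cons, pvDD_cons]
    by_cases h : pvTok r = "" ∨ pvTok r ∈ seen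
    · rw [if_pos h]
      refine (ih hL' seen).imp_of_mem ?_
      intro a b ha hb hab
      have ha' := (pvDD_mem _ _ _).1 ha
      have hb' := (pvDD_mem _ _ _).1 hb
      have hra : pvTok r ≠ a := by
        rcases h with h | h
        · rw [h]; exact fun he => ha'.2.1 he.symm
        · exact fun he => ha'.1 (he ▸ h)
      have hrb : pvTok r ≠ b := by
        rcases h with h | h
        · rw [h]; exact fun he => hb'.2.1 he.symm
        · exact fun he => hb'.1 (he ▸ h)
      rcases hab with ⟨ra, rb, h1, h2, h3⟩
      exact ⟨ra, rb, by rw [pvFirst_cons_ne hra]; exact h1,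
        by rw [pvFirst_cons_ne hrb]; exact h2, h3⟩
    · rw [if_neg h]
      push_neg at h
      refine List.pairwise_cons.2 ⟨?_, ?_⟩
      · intro b hb
        have hb' := (pvDD_mem _ _ _).1 hb
        have hbr : b ≠ pvTok r := fun he => hb'.1 (by simp [he])
        obtain ⟨y, hy, hyt⟩ := List.mem_map.1 hb'.2.2
        obtain ⟨rb, hrb⟩ := pvFirst_exists ⟨y, hy, hyt⟩
        have hrbm := pvFirst_some hrb
        refine ⟨r, rb, pvFirst_cons_eq rfl,
          by rw [pvFirst_cons_ne (fun he => hbr he.symm)]; exact hrb, ?_⟩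
        refine lt_of_le_of_ne (hr rb hrbm.1) (fun he => hbr ?_)
        have h4 := pvRowKey_inj_tok he
        rw [hrbm.2] at h4
        exact h4.symm
      · refine (ih hL' (seen ++ [pvTok r])).imp_of_mem ?_
        intro a b ha hb hab
        have ha' := (pvDD_mem _ _ _).1 ha
        have hb' := (pvDD_mem _ _ _).1 hb
        have hra : pvTok r ≠ a := fun he => ha'.1 (by simp [he])
        have hrb : pvTok r ≠ b := fun he => hb'.1 (by simp [he])
        rcases hab with ⟨ra, rb, h1, h2, h3⟩
        exact ⟨ra, rb, by rw [pvFirst_cons_ne hra]; exact h1,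
          by rw [pvFirst_cons_ne hrb]; exact h2, h3⟩

-- ----- B side -----
def pvGrp (L : List (List (String × String))) (t : String) : List (List (String × String)) :=
  L.filter (fun r => pvTok r == t)

def pvMinOf : List PvKey → PvKey
  | [] => default
  | k :: ks => ks.foldl min k

def pvMK (L : List (List (String × String))) (t : String) : PvKey :=
  pvMinOf ((pvGrp L t).map pvRowKey)

theorem pvMinOf_facts (ks : List PvKey) :
    ∀ k : PvKey, (ks.foldl min k) ∈ k :: ks ∧ ∀ x ∈ k :: ks, ks.foldl min k ≤ x := by
  induction ks with
  | nil => intro k; simp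
  | cons y ys ih =>
    intro k
    simp only [List.foldl_cons]
    rcases ih (min k y) with ⟨hmem, hle⟩
    constructor
    · rcases List.mem_cons.1 hmem with hm | hm
      · rcases min_choice k y with hc | hc <;> rw [hm, hc] <;> simp
      · simp [hm]
    · intro x hx
      rcases List.mem_cons.1 hx with rfl | hx
      · exact le_trans (hle _ List.mem_cons_self) (min_le_left _ _)
      · rcases List.mem_cons.1 hx with rfl | hx
        · exact le_trans (hle _ List.mem_cons_self) (min_le_right _ _)
        · exact hle _ (List.mem_cons_of_mem _ hx)

theorem pvMinOf_mem {l : List PvKey} (h : l ≠ []) : pvMinOf l ∈ l := by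
  cases l with
  | nil => exact absurd rfl h
  | cons k ks => exact (pvMinOf_facts ks k).1

theorem pvMinOf_le {l : List PvKey} (x : PvKey) (hx : x ∈ l) : pvMinOf l ≤ x := by
  cases l with
  | nil => simp at hx
  | cons k ks => exact (pvMinOf_facts ks k).2 x hx

theorem pvMinOf_perm {l l' : List PvKey} (h : l.Perm l') : pvMinOf l = pvMinOf l' := by
  rcases List.eq_nil_or_concat l with rfl | _
  · rw [h.nil_eq.symm]
  · have hne : l ≠ [] := by rintro rfl; simp_all
  -- placeholder
    have hne' : l' ≠ [] := by
      rintro rfl; exact hne h.eq_nil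
    exact le_antisymm (pvMinOf_le _ (h.mem_iff.2 (pvMinOf_mem hne'))) (pvMinOf_le _ (h.mem_iff.1 (pvMinOf_mem hne)))

theorem pvFoldlMin (k : PvKey) : ∀ ks : List PvKey, (∀ x ∈ ks, k ≤ x) → ks.foldl min k = k := by
  intro ks
  induction ks with
  | nil => intro _; rfl
  | cons y ys ih =>
    intro h
    simp only [List.foldl_cons]
    rw [min_eq_left (h y List.mem_cons_self)]
    exact ih (fun x hx => h x (List.mem_cons_of_mem _ hx))

theorem pvMinOf_head {k : PvKey} {ks : List PvKey} (h : ∀ x ∈ ks, k ≤ x) :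
    pvMinOf (k :: ks) = k := pvFoldlMin k ks h

-- B's dict after the whole loop: distinct nonempty tokens (first-occurrence order)
-- paired with their minimal key
theorem pvMinOf_append_singleton (l : List PvKey) (k : PvKey) :
    pvMinOf (l ++ [k]) = if l = [] then k else min (pvMinOf l) k := by
  cases l with
  | nil => simp [pvMinOf]
  | cons x xs =>
    show (xs ++ [k]).foldl min x = _
    rw [List.foldl_append]
    simp [pvMinOf]

theorem pvGrp_append_singleton (rows : List (List (String × String)))
    (r : List (String × String)) (t : String) :
    pvGrp (rows ++ [r]) t = pvGrp rows t ++ if pvTok r = t then [r] else [] := by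
  simp only [pvGrp, List.filter_append, List.filter_cons, List.filter_nil]
  by_cases h : pvTok r = t <;> simp [h]

theorem pvGrp_eq_nil_iff (rows : List (List (String × String))) (t : String) :
    pvGrp rows t = [] ↔ t ∉ rows.map pvTok := by
  rw [pvGrp, List.filter_eq_nil_iff]
  constructor
  · intro h ht
    rcases List.mem_map.1 ht with ⟨y, hy, rfl⟩
    exact h y hy (by simp)
  · intro h a ha hp
    exact h (List.mem_map.2 ⟨a, ha, by simpa using hp⟩)

theorem pvMK_append_ne {rows : List (List (String × String))} {r : List (String × String)}
    {t : String} (h : pvTok r ≠ t) : pvMK (rows ++ [r]) t = pvMK rows t := by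
  simp [pvMK, pvGrp_append_singleton, h]

theorem pvMK_append_eq {rows : List (List (String × String))} {r : List (String × String)}
    {t : String} (h : pvTok r = t) :
    pvMK (rows ++ [r]) t =
      if t ∈ rows.map pvTok then min (pvMK rows t) (pvRowKey r) else pvRowKey r := by
  rw [pvMK, pvGrp_append_singleton, if_pos h, List.map_append, List.map_cons, List.map_nil,
    pvMinOf_append_singleton]
  by_cases hm : t ∈ rows.map pvTok
  · rw [if_neg, if_pos hm]
    · rfl
    · simp only [List.map_eq_nil_iff]
      exact fun hg => ((pvGrp_eq_nil_iff rows t).1 hg) hm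
  · rw [if_pos, if_neg hm]
    rw [List.map_eq_nil_iff, pvGrp_eq_nil_iff]
    exact hm

-- find? over an association list built from a token list
theorem pvFind_map {ν : Type} (M : List String) (f : String → ν) (t : String) :
    List.find? (fun p => p.1 == t) (M.map (fun u => (u, f u))) =
      if t ∈ M then some (t, f t) else none := by
  induction M with
  | nil => simp
  | cons x xs ih =>
    by_cases h : x = t
    · subst h
      simp [List.find?_cons]
    · rw [List.map_cons, List.find?_cons]
      have hb : ((x, f x).1 == t) = false := by simpa using h
      rw [hb, ih]
      by_cases hm : t ∈ xs
      · rw [if_pos hm, if_pos (List.mem_cons_of_mem _ hm)]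
      · rw [if_neg hm, if_neg (by simp [h, hm, Ne.symm])]

theorem pvGet?_map {ν : Type} (M : List String) (f : String → ν) (t : String) :
    (PySem.Dict.mk (M.map (fun u => (u, f u)))).get? t =
      if t ∈ M then some (f t) else none := by
  simp only [PySem.Dict.get?, pvFind_map]
  by_cases hm : t ∈ M <;> simp [hm]

theorem pvGetD_map {ν : Type} (M : List String) (f : String → ν) (t : String) (dflt : ν) :
    (PySem.Dict.mk (M.map (fun u => (u, f u)))).getD t dflt =
      if t ∈ M then f t else dflt := by
  rw [PySem.Dict.getD, pvGet?_map]
  by_cases hm : t ∈ M <;> simp [hm]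

theorem pvContains_map {ν : Type} (M : List String) (f : String → ν) (t : String) :
    (PySem.Dict.mk (M.map (fun u => (u, f u)))).contains t = decide (t ∈ M) := by
  by_cases hm : t ∈ M
  · have hh : ((M.map (fun u => (u, f u))).any fun p => p.1 == t) = true :=
      List.any_eq_true.2 ⟨(t, f t), List.mem_map.2 ⟨t, hm, rfl⟩, by simp⟩
    simp [PySem.Dict.contains, hh, hm]
  · have hh : ((M.map (fun u => (u, f u))).any fun p => p.1 == t) = false := by
      rw [List.any_eq_false]
      intro x hx
      rcases List.mem_map.1 hx with ⟨a, ha, heq⟩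
      cases heq
      simp only [beq_iff_eq]
      exact fun he => hm (he ▸ ha)
    simp [PySem.Dict.contains, hh, hm]

theorem pvInsert_fresh {ν : Type} (M : List String) (f : String → ν) (t : String) (v : ν)
    (h : t ∉ M) :
    ((PySem.Dict.mk (M.map (fun u => (u, f u)))).insert t v).items =
      M.map (fun u => (u, f u)) ++ [(t, v)] := by
  rw [PySem.Dict.insert, if_neg]
  rw [pvContains_map]
  simp [h]

theorem pvInsert_overwrite {ν : Type} (M : List String) (f : String → ν) (t : String) (v : ν)
    (h : t ∈ M) :
    ((PySem.Dict.mk (M.map (fun u => (u, f u)))).insert t v).items =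
      M.map (fun u => (u, if u = t then v else f u)) := by
  rw [PySem.Dict.insert, if_pos]
  · show (M.map (fun u => (u, f u))).map _ = _
    rw [List.map_map]
    refine List.map_congr_left ?_
    intro a _
    by_cases ha : a = t
    · subst ha; simp
    · simp [ha]
  · rw [pvContains_map]; simp [h]

theorem pvFoldB (rows : List (List (String × String))) :
    (rows.foldl pvStepB PySem.Dict.empty).items =
      (pvDD [] (rows.map pvTok)).map (fun t => (t, vOfLex (pvMK rows t))) := by
  induction rows using List.reverseRecOn with
  | nil => rfl
  | append_singleton rows r ih =>
    rw [List.foldl_append, List.foldl_cons, List.foldl_nil, List.map_append, List.map_cons,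
      List.map_nil, pvDD_append_singleton]
    have hmemM : ∀ u, u ∈ pvDD [] (rows.map pvTok) ↔ u ≠ "" ∧ u ∈ rows.map pvTok := by
      intro u
      rw [pvDD_mem]
      simp
    -- the accumulated dict so far
    have hd : (rows.foldl pvStepB PySem.Dict.empty) =
        PySem.Dict.mk ((pvDD [] (rows.map pvTok)).map (fun t => (t, vOfLex (pvMK rows t)))) := by
      exact PySem.Dict.ext ih
    rw [hd]
    set M := pvDD [] (rows.map pvTok) with hM
    by_cases h0 : pvTok r = ""
    · -- skipped row: dict unchanged, token set unchanged
      rw [pvStepB, if_pos h0, if_pos (Or.inl h0), List.append_nil]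
      refine List.map_congr_left ?_
      intro a haM
      have ha := (hmemM a).1 haM
      rw [pvMK_append_ne (fun he => ha.1 (by rw [← he]; exact h0))]
    · rw [pvStepB, if_neg h0]
      by_cases hmem : pvTok r ∈ M
      · -- token already present: maybe lower its stored key
        have hmem' : pvTok r ∈ rows.map pvTok := ((hmemM _).1 hmem).2
        rw [if_pos (Or.inr (Or.inr hmem')), List.append_nil]
        rw [pvContains_map, pvGetD_map, if_pos hmem, decide_eq_true hmem, pvTupLt_eq]
        simp only [Bool.not_true, Bool.false_or]
        have hlex : lexOfV (vOfLex (pvMK rows (pvTok r))) = pvMK rows (pvTok r) := rfl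
        rw [show lexOfV (pvKeyT r) = pvRowKey r from rfl, hlex]
        have hval : ∀ a ∈ M, (a, vOfLex (pvMK (rows ++ [r]) a)) =
            (a, vOfLex (if a = pvTok r then min (pvMK rows (pvTok r)) (pvRowKey r)
              else pvMK rows a)) := by
          intro a _
          by_cases ha : a = pvTok r
          · subst ha
            rw [pvMK_append_eq rfl, if_pos hmem', if_pos rfl]
          · rw [pvMK_append_ne (fun he => ha he.symm), if_neg ha]
        rw [List.map_congr_left hval]
        by_cases hlt : pvRowKey r < pvMK rows (pvTok r)
        · rw [if_pos (decide_eq_true hlt), pvInsert_overwrite _ _ _ _ hmem]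
          refine (List.map_congr_left ?_).symm
          intro a _
          by_cases ha : a = pvTok r
          · subst ha
            rw [if_pos rfl, if_pos rfl, min_eq_right (le_of_lt hlt)]
            rfl
          · rw [if_neg ha, if_neg ha]
        · rw [if_neg (by simpa using hlt)]
          refine (List.map_congr_left ?_).symm
          intro a _
          by_cases ha : a = pvTok r
          · subst ha
            rw [if_pos rfl, min_eq_left (le_of_not_gt hlt)]
          · rw [if_neg ha]
      · -- new token: appended at the end with its own key
        have hmem' : pvTok r ∉ rows.map pvTok := fun hc => hmem ((hmemM _).2 ⟨h0, hc⟩)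
        rw [if_neg (show ¬(pvTok r = "" ∨ pvTok r ∈ ([] : List String) ∨
          pvTok r ∈ rows.map pvTok) from by simp [h0, hmem'])]
        rw [pvContains_map]
        rw [if_pos (by simp [hmem]), pvInsert_fresh _ _ _ _ hmem]
        rw [List.map_append, List.map_cons, List.map_nil]
        congr 1
        · refine List.map_congr_left ?_
          intro a haM
          rw [pvMK_append_ne (fun he => hmem (he ▸ haM))]
        · rw [pvMK_append_eq rfl, if_neg hmem']
          rfl

-- the first row of a group in the key-sorted list carries the group's minimal key
theorem pvMK_first {rows : List (List (String × String))} {t : String}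
    {ra : List (String × String)}
    (h : pvFirst (PySem.List.sorted rows pvRowKey) t = some ra) :
    pvMK rows t = pvRowKey ra := by
  have hperm : (pvGrp (PySem.List.sorted rows pvRowKey) t).Perm (pvGrp rows t) :=
    (PySem.List.sorted_perm rows pvRowKey false).filter _
  have h1 : pvMK rows t = pvMinOf ((pvGrp (PySem.List.sorted rows pvRowKey) t).map pvRowKey) :=
    (pvMinOf_perm (hperm.map pvRowKey)).symm
  cases hg : pvGrp (PySem.List.sorted rows pvRowKey) t with
  | nil =>
    rw [show pvFirst (PySem.List.sorted rows pvRowKey) t =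
      (pvGrp (PySem.List.sorted rows pvRowKey) t).head? from rfl, hg] at h
    simp at h
  | cons a rest =>
    have ha : a = ra := by
      rw [show pvFirst (PySem.List.sorted rows pvRowKey) t =
        (pvGrp (PySem.List.sorted rows pvRowKey) t).head? from rfl, hg] at h
      simpa using h
    subst ha
    have hpw : (pvGrp (PySem.List.sorted rows pvRowKey) t).Pairwise
        (fun x y => pvRowKey x ≤ pvRowKey y) :=
      (PySem.List.sorted_pairwise rows pvRowKey).filter _
    rw [hg] at hpw
    have hle : ∀ x ∈ rest, pvRowKey a ≤ pvRowKey x := (List.pairwise_cons.1 hpw).1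
    rw [h1, hg, List.map_cons, pvMinOf_head]
    intro x hx
    rcases List.mem_map.1 hx with ⟨y, hy, rfl⟩
    exact hle y hy

-- ===== VERDICT (by name: the statement is the Claim_ definition above) =====
theorem selection_tokens_from_rows_py_spec : Claim_equal_selection_tokens_from_rows_py := by
  intro rows _
  show selection_tokens_from_rows_py rows = selection_tokens_from_rows_py_alt rows
  rw [pvA_eq, pvB_eq, pvFoldB]
  have hA : ((PySem.List.sorted rows pvRowKey).foldl pvStepA (PySem.Set.empty, [])).2 =
      pvDD [] ((PySem.List.sorted rows pvRowKey).map pvTok) := by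
    rw [pvFoldA]; rfl
  rw [hA]
  have hmem : ∀ a, a ∈ pvDD [] ((PySem.List.sorted rows pvRowKey).map pvTok) ↔
      a ∈ pvDD [] (rows.map pvTok) := by
    intro a
    rw [pvDD_mem, pvDD_mem]
    have hm2 : a ∈ (PySem.List.sorted rows pvRowKey).map pvTok ↔ a ∈ rows.map pvTok :=
      ((PySem.List.sorted_perm rows pvRowKey false).map pvTok).mem_iff
    tauto
  have hOM : (pvDD [] ((PySem.List.sorted rows pvRowKey).map pvTok)).Perm
      (pvDD [] (rows.map pvTok)) :=
    (List.perm_ext_iff_of_nodup (pvDD_nodup _ _) (pvDD_nodup _ _)).2 hmem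
  have hpair : ((pvDD [] ((PySem.List.sorted rows pvRowKey).map pvTok)).map
      (fun t => (t, vOfLex (pvMK rows t)))).Pairwise
        (fun p q => lexOfV p.2 < lexOfV q.2) := by
    rw [List.pairwise_map]
    refine (pvDD_pairwise (PySem.List.sorted rows pvRowKey)
      (PySem.List.sorted_pairwise rows pvRowKey) []).imp ?_
    rintro a b ⟨ra, rb, h1, h2, h3⟩
    show lexOfV (vOfLex (pvMK rows a)) < lexOfV (vOfLex (pvMK rows b))
    rw [show ∀ k : PvKey, lexOfV (vOfLex k) = k from fun _ => rfl,
      show ∀ k : PvKey, lexOfV (vOfLex k) = k from fun _ => rfl,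
      pvMK_first h1, pvMK_first h2]
    exact h3
  rw [PySem.List.sorted_eq_of_perm_of_pairwise_lt _ _ _ (hOM.map _) hpair, List.map_map]
  exact (List.map_id' _).symm
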